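-- pv_equiv track=rewrite | github.com/hexycat/advent-of-code | 2020/python/09/problem1.py | is_sum_of_previous
-- ===== SOURCE A (Python) =====
-- def is_sum_of_previous(number, stack):
--   for i in range(len(stack)):
--     for j in range(i, len(stack)):
--       if stack[i] == stack[j]:
--         continue
--       if stack[i] + stack[j] == number:
--         return True
--   return False
-- ===== SOURCE B (Python) =====
-- def is_sum_of_previous(number, stack):
--   seen = set(stack)
--   for x in stack:
--     y = number - x
--     if y != x and y in seen:
--       return True
--   return False
-- ===== Notes on version B (the rewrite author's own statement) =====
-- stated objective: faster
-- what changed: Replaces the quadratic nested index scan with a set built once plus a single pass that looks up the complement number-x, keeping the distinct-value rule (y != x).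
import Mathlib
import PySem

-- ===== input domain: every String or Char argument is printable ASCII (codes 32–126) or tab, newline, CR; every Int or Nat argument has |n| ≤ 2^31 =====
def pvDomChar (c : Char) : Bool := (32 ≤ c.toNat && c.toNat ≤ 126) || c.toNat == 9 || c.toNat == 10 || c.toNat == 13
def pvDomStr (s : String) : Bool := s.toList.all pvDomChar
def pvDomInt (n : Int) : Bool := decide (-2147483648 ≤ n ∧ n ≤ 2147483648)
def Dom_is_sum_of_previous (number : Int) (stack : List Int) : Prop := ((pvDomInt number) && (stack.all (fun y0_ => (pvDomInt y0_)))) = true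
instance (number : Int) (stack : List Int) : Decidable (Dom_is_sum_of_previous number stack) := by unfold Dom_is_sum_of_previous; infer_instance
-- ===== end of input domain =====

-- B replaces A's quadratic nested index scan with a set built once and a single
-- pass looking up the complement number-x (keeping the distinct-value rule y ≠ x); faster.

-- ===== PORT A =====
def is_sum_of_previous (number : Int) (stack : List Int) : Bool :=
  (PySem.List.pyRange 0 stack.length 1).any (fun i =>
    (PySem.List.pyRange i stack.length 1).any (fun j =>
      match PySem.List.pyGet? stack i, PySem.List.pyGet? stack j with
      | some a, some b => if a == b then false else decide (a + b = number)
      | _, _ => false))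

-- ===== PORT B =====
def is_sum_of_previous_alt (number : Int) (stack : List Int) : Bool :=
  let seen : PySem.Set Int := PySem.Set.ofList stack
  stack.any (fun x => (number - x != x) && PySem.Set.contains seen (number - x))

-- ===== PRECONDITION & SPEC =====
def Spec_is_sum_of_previous (number : Int) (stack : List Int) (out : Bool) : Prop := out = is_sum_of_previous_alt number stack
instance (number : Int) (stack : List Int) (out : Bool) : Decidable (Spec_is_sum_of_previous number stack out) := by unfold Spec_is_sum_of_previous; infer_instance

-- ===== CLAIM (what is proved, stated in full; the proofs are below) =====
def Claim_equal_is_sum_of_previous : Prop := ∀ (number : Int) (stack : List Int), Dom_is_sum_of_previous number stack → Spec_is_sum_of_previous number stack (is_sum_of_previous number stack)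

-- ===== LEMMAS AND PROOFS =====

-- Both programs decide the same predicate: some two elements with distinct values sum to number.
lemma alt_char (number : Int) (stack : List Int) :
    is_sum_of_previous_alt number stack = true ↔
      ∃ x ∈ stack, number - x ≠ x ∧ number - x ∈ stack := by
  simp [is_sum_of_previous_alt, List.any_eq_true, PySem.Set.mem_ofList, bne_iff_ne]

lemma a_char (number : Int) (stack : List Int) :
    is_sum_of_previous number stack = true ↔
      ∃ p q : Nat, ∃ hp : p < stack.length, ∃ hq : q < stack.length,
        p ≤ q ∧ stack[p] ≠ stack[q] ∧ stack[p] + stack[q] = number := by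
  simp only [is_sum_of_previous, List.any_eq_true, PySem.List.mem_pyRange_one]
  constructor
  · rintro ⟨i, ⟨hi0, hin⟩, j, ⟨hij, hjn⟩, hmatch⟩
    have hj0 : (0 : Int) ≤ j := le_trans hi0 hij
    have hpi : i.toNat < stack.length := by omega
    have hpj : j.toNat < stack.length := by omega
    rw [PySem.List.pyGet?_eq_some_getElem stack hi0 (by exact_mod_cast hin),
        PySem.List.pyGet?_eq_some_getElem stack hj0 (by exact_mod_cast hjn)] at hmatch
    simp only [] at hmatch
    split_ifs at hmatch with h
    refine ⟨i.toNat, j.toNat, hpi, hpj, by omega, by simpa using h, by simpa using hmatch⟩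
  · rintro ⟨p, q, hp, hq, hpq, hne, hsum⟩
    refine ⟨(p : Int), ⟨by positivity, by exact_mod_cast hp⟩,
            (q : Int), ⟨by exact_mod_cast hpq, by exact_mod_cast hq⟩, ?_⟩
    rw [PySem.List.pyGet?_eq_some_getElem stack (Int.natCast_nonneg p) (by exact_mod_cast hp),
        PySem.List.pyGet?_eq_some_getElem stack (Int.natCast_nonneg q) (by exact_mod_cast hq)]
    simp only [Int.toNat_natCast]
    split_ifs with h
    · exact absurd (by simpa using h) hne
    · simpa using hsum

lemma same_pred (number : Int) (stack : List Int) :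
    is_sum_of_previous number stack = is_sum_of_previous_alt number stack := by
  rw [Bool.eq_iff_iff, a_char, alt_char]
  constructor
  · rintro ⟨p, q, hp, hq, _, hne, hsum⟩
    exact ⟨stack[p], List.getElem_mem hp, by omega, by
      have : number - stack[p] = stack[q] := by omega
      rw [this]; exact List.getElem_mem hq⟩
  · rintro ⟨x, hx, hne, hy⟩
    obtain ⟨p, hp, hxp⟩ := List.mem_iff_getElem.mp hx
    obtain ⟨q, hq, hyq⟩ := List.mem_iff_getElem.mp hy
    rcases le_total p q with h | h
    · exact ⟨p, q, hp, hq, h, by rw [hxp, hyq]; omega, by rw [hxp, hyq]; omega⟩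
    · exact ⟨q, p, hq, hp, h, by rw [hxp, hyq]; omega, by rw [hxp, hyq]; omega⟩

-- ===== VERDICT (by name: the statement is the Claim_ definition above) =====
theorem is_sum_of_previous_spec : Claim_equal_is_sum_of_previous := by
  intro number stack _
  exact same_pred number stack
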